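-- pv_equiv track=rewrite | github.com/stanislawkubik/fuggers-py | tools/validate_public_api_refactor.py | _replacement_import_path
-- ===== SOURCE A (Python) =====
-- LEGACY_IMPORT_REPLACEMENTS = {
--     "fuggers_py.market.curves": "fuggers_py.curves",
--     "fuggers_py.market.vol_surfaces": "fuggers_py.vol_surfaces",
--     "fuggers_py.products.bonds": "fuggers_py.bonds",
--     "fuggers_py.pricers.bonds": "fuggers_py.bonds",
--     "fuggers_py.measures.yields": "fuggers_py.bonds",
--     "fuggers_py.measures.spreads": "fuggers_py.bonds",
--     "fuggers_py.measures.risk": "fuggers_py.bonds",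
--     "fuggers_py.measures.yas": "fuggers_py.bonds",
--     "fuggers_py.products.rates": "fuggers_py.rates",
--     "fuggers_py.pricers.rates": "fuggers_py.rates",
--     "fuggers_py.market.indices": "fuggers_py.rates",
--     "fuggers_py.reference.inflation": "fuggers_py.inflation",
--     "fuggers_py.measures.inflation": "fuggers_py.inflation",
--     "fuggers_py.products.credit": "fuggers_py.credit",
--     "fuggers_py.pricers.credit": "fuggers_py.credit",
--     "fuggers_py.measures.credit": "fuggers_py.credit",
--     "fuggers_py.products.funding": "fuggers_py.funding",
--     "fuggers_py.measures.funding": "fuggers_py.funding",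
-- }
--
-- def _replacement_import_path(legacy_import_path: str) -> str | None:
--     best_match: tuple[int, str] | None = None
--     for old_path, new_path in LEGACY_IMPORT_REPLACEMENTS.items():
--         if legacy_import_path == old_path or legacy_import_path.startswith(old_path + "."):
--             score = len(old_path)
--             if best_match is None or score > best_match[0]:
--                 best_match = (score, new_path)
--     if best_match is None:
--         return None
--     return best_match[1]
-- ===== SOURCE B (Python) =====
-- LEGACY_IMPORT_REPLACEMENTS = {
--     "fuggers_py.market.curves": "fuggers_py.curves",
--     "fuggers_py.market.vol_surfaces": "fuggers_py.vol_surfaces",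
--     "fuggers_py.products.bonds": "fuggers_py.bonds",
--     "fuggers_py.pricers.bonds": "fuggers_py.bonds",
--     "fuggers_py.measures.yields": "fuggers_py.bonds",
--     "fuggers_py.measures.spreads": "fuggers_py.bonds",
--     "fuggers_py.measures.risk": "fuggers_py.bonds",
--     "fuggers_py.measures.yas": "fuggers_py.bonds",
--     "fuggers_py.products.rates": "fuggers_py.rates",
--     "fuggers_py.pricers.rates": "fuggers_py.rates",
--     "fuggers_py.market.indices": "fuggers_py.rates",
--     "fuggers_py.reference.inflation": "fuggers_py.inflation",
--     "fuggers_py.measures.inflation": "fuggers_py.inflation",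
--     "fuggers_py.products.credit": "fuggers_py.credit",
--     "fuggers_py.pricers.credit": "fuggers_py.credit",
--     "fuggers_py.measures.credit": "fuggers_py.credit",
--     "fuggers_py.products.funding": "fuggers_py.funding",
--     "fuggers_py.measures.funding": "fuggers_py.funding",
-- }
--
--
-- def _replacement_import_path(legacy_import_path: str) -> str | None:
--     # Walk the dot-boundary prefixes of the path from longest to shortest and
--     # return the replacement of the first one that is a legacy key.
--     n = len(legacy_import_path)
--     for i in range(n, 0, -1):
--         if i == n or legacy_import_path[i] == ".":
--             replacement = LEGACY_IMPORT_REPLACEMENTS.get(legacy_import_path[:i])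
--             if replacement is not None:
--                 return replacement
--     return None
-- ===== Notes on version B (the rewrite author's own statement) =====
-- stated objective: idiomatic
-- what changed: A scans all 18 table entries testing each key against the input while tracking the max key length; B instead walks the input's dot-boundary prefixes from longest to shortest and returns the first one found by a direct dict lookup, so the max-tracking scan disappears.
import Mathlib
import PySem

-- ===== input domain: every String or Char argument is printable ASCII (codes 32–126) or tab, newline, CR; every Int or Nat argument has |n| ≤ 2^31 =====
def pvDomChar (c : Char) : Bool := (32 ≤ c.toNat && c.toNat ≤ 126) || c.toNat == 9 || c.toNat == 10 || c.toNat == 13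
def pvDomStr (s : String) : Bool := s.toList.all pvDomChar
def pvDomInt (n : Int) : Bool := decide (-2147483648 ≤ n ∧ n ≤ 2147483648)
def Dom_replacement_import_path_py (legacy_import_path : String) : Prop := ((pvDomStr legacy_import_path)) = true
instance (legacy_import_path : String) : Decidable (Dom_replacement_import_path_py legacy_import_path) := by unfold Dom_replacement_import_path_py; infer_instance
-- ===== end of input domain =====

-- B replaces A's full scan of the replacement table (tracking a max score) by a walk over the
-- input's dot-boundary prefixes, longest first, with a direct dict lookup per prefix (idiomatic).

-- the module-level dict LEGACY_IMPORT_REPLACEMENTS (insertion order)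
def pvTbl : List (String × String) := [
  ("fuggers_py.market.curves", "fuggers_py.curves"),
  ("fuggers_py.market.vol_surfaces", "fuggers_py.vol_surfaces"),
  ("fuggers_py.products.bonds", "fuggers_py.bonds"),
  ("fuggers_py.pricers.bonds", "fuggers_py.bonds"),
  ("fuggers_py.measures.yields", "fuggers_py.bonds"),
  ("fuggers_py.measures.spreads", "fuggers_py.bonds"),
  ("fuggers_py.measures.risk", "fuggers_py.bonds"),
  ("fuggers_py.measures.yas", "fuggers_py.bonds"),
  ("fuggers_py.products.rates", "fuggers_py.rates"),
  ("fuggers_py.pricers.rates", "fuggers_py.rates"),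
  ("fuggers_py.market.indices", "fuggers_py.rates"),
  ("fuggers_py.reference.inflation", "fuggers_py.inflation"),
  ("fuggers_py.measures.inflation", "fuggers_py.inflation"),
  ("fuggers_py.products.credit", "fuggers_py.credit"),
  ("fuggers_py.pricers.credit", "fuggers_py.credit"),
  ("fuggers_py.measures.credit", "fuggers_py.credit"),
  ("fuggers_py.products.funding", "fuggers_py.funding"),
  ("fuggers_py.measures.funding", "fuggers_py.funding")]

def pvLEGACY : PySem.Dict String String := PySem.Dict.ofList pvTbl

-- ===== PORT A =====
-- A's loop test: legacy_import_path == old_path or legacy_import_path.startswith(old_path + ".")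
def pvCond (s : String) (kv : String × String) : Bool :=
  s == kv.1 || PySem.Str.startswith s (kv.1 ++ ".")

-- one iteration of A's for-loop over the dict items, state = best_match
def pvStep (s : String) (best : Option (Int × String)) (kv : String × String) : Option (Int × String) :=
  if pvCond s kv then
    match best with
    | none => some (PySem.Str.len kv.1, kv.2)
    | some b => if b.1 < PySem.Str.len kv.1 then some (PySem.Str.len kv.1, kv.2) else some b
  else best

def replacement_import_path_py (legacy_import_path : String) : Option String :=
  match pvLEGACY.items.foldl (pvStep legacy_import_path) none with
  | none => none
  | some b => some b.2

-- ===== PORT B =====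
-- B's for i in range(n, 0, -1): the loop counter i descends; i = 0 means the loop is exhausted
def pvAltLoop (s : String) (n : Nat) : Nat → Option String
  | 0 => none
  | j + 1 =>
    if j + 1 == n || PySem.Str.pyGet? s ((j + 1 : Nat) : Int) == some '.' then
      match pvLEGACY.get? (PySem.Str.slice s none (some ((j + 1 : Nat) : Int))) with
      | some replacement => some replacement
      | none => pvAltLoop s n j
    else pvAltLoop s n j

def replacement_import_path_py_alt (legacy_import_path : String) : Option String :=
  pvAltLoop legacy_import_path legacy_import_path.toList.length legacy_import_path.toList.length

-- ===== PRECONDITION & SPEC =====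
def Spec_replacement_import_path_py (legacy_import_path : String) (out : Option String) : Prop := out = replacement_import_path_py_alt legacy_import_path
instance (legacy_import_path : String) (out : Option String) : Decidable (Spec_replacement_import_path_py legacy_import_path out) := by unfold Spec_replacement_import_path_py; infer_instance

-- ===== CLAIM (what is proved, stated in full; the proofs are below) =====
def Claim_equal_replacement_import_path_py : Prop := ∀ (legacy_import_path : String), Dom_replacement_import_path_py legacy_import_path → Spec_replacement_import_path_py legacy_import_path (replacement_import_path_py legacy_import_path)

-- ===== LEMMAS AND PROOFS =====

-- "old_path matches s": s == old or s startswith old ++ "." (on the character lists)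
def pvMatches (cs K : List Char) : Prop := cs = K ∨ (K ++ ['.']) <+: cs

theorem pvCond_iff (s : String) (kv : String × String) :
    pvCond s kv = true ↔ pvMatches s.toList kv.1.toList := by
  simp [pvCond, pvMatches, PySem.Str.startswith_eq, PySem.Chars.startswith_iff,
    ← String.toList_inj]

theorem pvMatches_iff (cs K : List Char) :
    pvMatches cs K ↔ K.length ≤ cs.length ∧ cs.take K.length = K ∧
      (K.length = cs.length ∨ cs[K.length]? = some '.') := by
  constructor
  · rintro (rfl | ⟨t, ht⟩)
    · exact ⟨le_refl _, List.take_length, Or.inl rfl⟩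
    · subst ht
      refine ⟨?_, ?_, Or.inr ?_⟩
      · simp only [List.length_append, List.length_cons, List.length_nil]; omega
      · rw [List.take_append_of_le_length (by simp), List.take_append_of_le_length (le_refl _),
          List.take_length]
      · rw [List.getElem?_append_left (by simp), List.getElem?_append_right (le_refl _)]
        simp
  · rintro ⟨hle, htake, (heq | hget)⟩
    · left; rw [← htake, heq, List.take_length]
    · obtain ⟨hlt, hv⟩ := List.getElem?_eq_some_iff.mp hget
      right
      refine ⟨cs.drop (K.length + 1), ?_⟩
      conv_rhs => rw [← List.take_append_drop K.length cs]
      rw [htake, List.drop_eq_getElem_cons hlt, hv]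
      simp

theorem pvKeysNodup : (pvTbl.map (·.1)).Nodup := by decide

theorem pvNoDotPrefix : ∀ kv1 ∈ pvTbl, ∀ kv2 ∈ pvTbl,
    ¬ (kv1.1.toList ++ ['.'] <+: kv2.1.toList) := by decide

theorem pvKeysNe : ∀ kv ∈ pvTbl, kv.1.toList ≠ [] := by decide

theorem pvItems : pvLEGACY.items = pvTbl := by decide

-- a dot-boundary prefix of cs at each of two lengths: the shorter key is a dot-prefix of the longer
theorem pvDotPrefix_of_lt (cs K1 K2 : List Char)
    (h1 : pvMatches cs K1) (h2 : pvMatches cs K2) (hlt : K1.length < K2.length) :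
    K1 ++ ['.'] <+: K2 := by
  rw [pvMatches_iff] at h1 h2
  obtain ⟨hle1, ht1, hb1⟩ := h1
  obtain ⟨hle2, ht2, hb2⟩ := h2
  have hK1 : K2.take K1.length = K1 := by
    rw [← ht2, List.take_take, min_eq_left (le_of_lt hlt), ht1]
  have hdot : cs[K1.length]? = some '.' := by
    rcases hb1 with h | h
    · omega
    · exact h
  have hK2get : K2[K1.length]? = some '.' := by
    rw [← ht2, List.getElem?_take_of_lt hlt]
    exact hdot
  obtain ⟨hlt2, hv⟩ := List.getElem?_eq_some_iff.mp hK2get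
  refine ⟨K2.drop (K1.length + 1), ?_⟩
  conv_rhs => rw [← List.take_append_drop K1.length K2]
  rw [hK1, List.drop_eq_getElem_cons hlt2, hv]
  simp

theorem pvUnique (s : String) : ∀ kv1 ∈ pvTbl, ∀ kv2 ∈ pvTbl,
    pvMatches s.toList kv1.1.toList → pvMatches s.toList kv2.1.toList → kv1 = kv2 := by
  intro kv1 h1 kv2 h2 m1 m2
  rcases Nat.lt_trichotomy kv1.1.toList.length kv2.1.toList.length with h | h | h
  · exact absurd (pvDotPrefix_of_lt _ _ _ m1 m2 h) (pvNoDotPrefix kv1 h1 kv2 h2)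
  · have hK : kv1.1.toList = kv2.1.toList := by
      rw [pvMatches_iff] at m1 m2
      rw [← m1.2.1, ← m2.2.1, h]
    exact List.inj_on_of_nodup_map pvKeysNodup h1 h2 (String.toList_inj.mp hK)
  · exact absurd (pvDotPrefix_of_lt _ _ _ m2 m1 h) (pvNoDotPrefix kv2 h2 kv1 h1)

theorem pvFold_skip (s : String) (l : List (String × String)) (acc : Option (Int × String))
    (h : ∀ kv ∈ l, pvCond s kv = false) : l.foldl (pvStep s) acc = acc := by
  induction l generalizing acc with
  | nil => rfl
  | cons x t ih =>
    rw [List.foldl_cons]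
    rw [show pvStep s acc x = acc by simp [pvStep, h x (by simp)]]
    exact ih acc (fun kv hkv => h kv (by simp [hkv]))

theorem pvFold_char (s : String) (l : List (String × String))
    (hnd : (l.map (·.1)).Nodup)
    (hu : ∀ kv1 ∈ l, ∀ kv2 ∈ l, pvCond s kv1 = true → pvCond s kv2 = true → kv1 = kv2) :
    l.foldl (pvStep s) none = (l.find? (pvCond s)).map (fun kv => (PySem.Str.len kv.1, kv.2)) := by
  induction l with
  | nil => rfl
  | cons x t ih =>
    by_cases hx : pvCond s x = true
    · rw [List.foldl_cons, show pvStep s none x = some (PySem.Str.len x.1, x.2) by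
        simp [pvStep, hx]]
      rw [pvFold_skip s t _ (fun kv hkv => by
        by_contra hc
        have : kv = x := hu kv (by simp [hkv]) x (by simp) (by simpa using hc) hx
        subst this
        exact (List.nodup_cons.mp hnd).1 (List.mem_map_of_mem hkv))]
      simp [hx]
    · rw [List.foldl_cons, show pvStep s none x = none by simp [pvStep, hx]]
      rw [ih (List.nodup_cons.mp hnd).2
        (fun kv1 h1 kv2 h2 => hu kv1 (by simp [h1]) kv2 (by simp [h2]))]
      simp [hx]

theorem pvA_eq_find (s : String) :
    replacement_import_path_py s = (pvTbl.find? (pvCond s)).map (·.2) := by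
  unfold replacement_import_path_py
  rw [pvItems, pvFold_char s pvTbl pvKeysNodup
    (fun kv1 h1 kv2 h2 c1 c2 => pvUnique s kv1 h1 kv2 h2 ((pvCond_iff s kv1).mp c1) ((pvCond_iff s kv2).mp c2))]
  cases pvTbl.find? (pvCond s) <;> simp

-- the string B looks up at step i is the length-i prefix of s
theorem pvSliceTake (s : String) (i : Nat) :
    (PySem.Str.slice s none (some (i : Int))).toList = s.toList.take i := by
  rw [PySem.Str.toList_slice, PySem.Chars.slice_eq_listSlice, PySem.List.slice_to_natCast]

-- when no table key matches, every lookup of B's loop misses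
theorem pvLookup_matches (s : String) (i : Nat) (hle : i ≤ s.toList.length)
    (hb : i = s.toList.length ∨ s.toList[i]? = some '.')
    {r : String} (hg : pvLEGACY.get? (PySem.Str.slice s none (some (i : Int))) = some r) :
    (PySem.Str.slice s none (some (i : Int)), r) ∈ pvTbl ∧
      pvMatches s.toList (PySem.Str.slice s none (some (i : Int))).toList ∧
      (PySem.Str.slice s none (some (i : Int))).toList.length = i := by
  have hm := PySem.Dict.mem_items_of_get?_eq_some pvLEGACY hg
  rw [pvItems] at hm
  have hq : (PySem.Str.slice s none (some (i : Int))).toList = s.toList.take i := pvSliceTake s i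
  have hlen : (PySem.Str.slice s none (some (i : Int))).toList.length = i := by
    rw [hq, List.length_take]; omega
  refine ⟨hm, ?_, hlen⟩
  rw [pvMatches_iff, hlen, hq]
  exact ⟨hle, rfl, hb⟩

theorem pvB_none (s : String) (h : ∀ kv ∈ pvTbl, ¬ pvCond s kv = true) :
    ∀ i, i ≤ s.toList.length → pvAltLoop s s.toList.length i = none := by
  intro i
  induction i with
  | zero => intro _; rfl
  | succ j ih =>
    intro hle
    simp only [pvAltLoop]
    by_cases hb : (j + 1 = s.toList.length ∨ s.toList[j + 1]? = some '.')
    · have hget : pvLEGACY.get? (PySem.Str.slice s none (some ((j + 1 : Nat) : Int))) = none := by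
        cases hg : pvLEGACY.get? (PySem.Str.slice s none (some ((j + 1 : Nat) : Int))) with
        | none => rfl
        | some r =>
          exfalso
          obtain ⟨hm, hmat, _⟩ := pvLookup_matches s (j + 1) hle hb hg
          exact h _ hm ((pvCond_iff s _).mpr hmat)
      rw [hget]
      split
      · exact ih (by omega)
      · exact ih (by omega)
    · have hbb : ((j + 1 : Nat) == s.toList.length
          || PySem.Str.pyGet? s ((j + 1 : Nat) : Int) == some '.') = false := by
        simp only [Bool.or_eq_false_iff, beq_eq_false_iff_ne, ne_eq, PySem.Str.pyGet?_natCast]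
        exact not_or.mp hb
      rw [hbb]
      simp only [Bool.false_eq_true, if_false]
      exact ih (by omega)

theorem pvB_hit (s : String) (kv0 : String × String) (hmem : kv0 ∈ pvTbl)
    (hm : pvMatches s.toList kv0.1.toList) :
    ∀ i, kv0.1.toList.length ≤ i → i ≤ s.toList.length →
      pvAltLoop s s.toList.length i = some kv0.2 := by
  intro i
  induction i with
  | zero =>
    intro h0 _
    exact absurd (List.length_eq_zero_iff.mp (Nat.le_zero.mp h0)) (pvKeysNe kv0 hmem)
  | succ j ih =>
    intro hl0 hle
    obtain ⟨hle0, ht0, hb0⟩ := (pvMatches_iff _ _).mp hm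
    simp only [pvAltLoop]
    by_cases hij : j + 1 = kv0.1.toList.length
    · -- the hit: the boundary test holds at the key's length and the lookup returns kv0.2
      have hbb : ((j + 1 : Nat) == s.toList.length
          || PySem.Str.pyGet? s ((j + 1 : Nat) : Int) == some '.') = true := by
        simp only [Bool.or_eq_true, beq_iff_eq, PySem.Str.pyGet?_natCast]
        rw [hij]
        exact hb0
      rw [hbb]
      have hq : PySem.Str.slice s none (some ((j + 1 : Nat) : Int)) = kv0.1 := by
        apply String.toList_inj.mp
        rw [pvSliceTake, hij, ht0]
      have hget : pvLEGACY.get? (PySem.Str.slice s none (some ((j + 1 : Nat) : Int)))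
          = some kv0.2 := by
        rw [hq]
        refine PySem.Dict.get?_of_mem_items pvLEGACY ?_ (PySem.Dict.nodup_keys_ofList pvTbl)
        rw [pvItems]
        simpa using hmem
      rw [hget]
      simp
    · -- above the key's length: any successful lookup would be a second, longer matching key
      have hget : pvLEGACY.get? (PySem.Str.slice s none (some ((j + 1 : Nat) : Int))) = none ∨
          ¬ ((j + 1 : Nat) == s.toList.length
            || PySem.Str.pyGet? s ((j + 1 : Nat) : Int) == some '.') = true := by
        by_cases hb : (j + 1 = s.toList.length ∨ s.toList[j + 1]? = some '.')
        · left
          cases hg : pvLEGACY.get? (PySem.Str.slice s none (some ((j + 1 : Nat) : Int))) with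
          | none => rfl
          | some r =>
            exfalso
            obtain ⟨hm', hmat', hlen'⟩ := pvLookup_matches s (j + 1) hle hb hg
            have heq := pvUnique s _ hm' kv0 hmem hmat' hm
            have h1 : kv0.1.toList.length = j + 1 := by rw [← heq]; exact hlen'
            exact hij h1.symm
        · right
          simp only [Bool.or_eq_true, beq_iff_eq, PySem.Str.pyGet?_natCast]
          exact hb
      rcases hget with hg | hb
      · rw [hg]
        split
        · exact ih (by omega) (by omega)
        · exact ih (by omega) (by omega)
      · rw [Bool.not_eq_true] at hb
        rw [hb]
        simp only [Bool.false_eq_true, if_false]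
        exact ih (by omega) (by omega)

-- ===== VERDICT (by name: the statement is the Claim_ definition above) =====
theorem replacement_import_path_py_spec : Claim_equal_replacement_import_path_py := by
  intro s _
  unfold Spec_replacement_import_path_py replacement_import_path_py_alt
  rw [pvA_eq_find]
  cases hf : pvTbl.find? (pvCond s) with
  | none =>
    rw [Option.map_none]
    exact (pvB_none s (by simpa using List.find?_eq_none.mp hf) _ (le_refl _)).symm
  | some kv0 =>
    have hmem := List.mem_of_find?_eq_some hf
    have hc := List.find?_some hf
    have hm := (pvCond_iff s kv0).mp hc
    have hle : kv0.1.toList.length ≤ s.toList.length := ((pvMatches_iff _ _).mp hm).1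
    rw [Option.map_some]
    exact (pvB_hit s kv0 hmem hm _ hle (le_refl _)).symm
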